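-- pv_equiv track=rewrite | github.com/dharssan17/customer-support-auto-responder-app | backend/app.py | is_greeting_message
-- ===== SOURCE A (Python) =====
-- def is_greeting_message(user_message):
--     """
--     Check if the user message is a greeting or small-talk
--
--     Args:
--         user_message (str): The user's message
--
--     Returns:
--         bool: True if it's a greeting, False otherwise
--     """
--     # List of greeting keywords to detect
--     greeting_keywords = [
--         "hi",
--         "hello",
--         "hey",
--         "thanks",
--         "thank you",
--         "good morning",
--         "good evening"
--     ]
--
--     # Convert to lowercase for case-insensitive comparison
--     message_lower = user_message.lower().strip()
--
--     # Check if message matches any greeting keyword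
--     # Match exact word or phrase at the start of message
--     for keyword in greeting_keywords:
--         if message_lower == keyword or message_lower.startswith(keyword + " "):
--             return True
--
--     return False
-- ===== SOURCE B (Python) =====
-- _ONE = {"hi", "hello", "hey", "thanks"}
-- _PAIRS = {("thank", "you"), ("good", "morning"), ("good", "evening")}
--
--
-- def is_greeting_message(user_message):
--     s = user_message.lower().strip()
--     first, sep, rest = s.partition(" ")
--     if first in _ONE:
--         return True
--     return sep == " " and (first, rest.partition(" ")[0]) in _PAIRS
-- ===== Notes on version B (the rewrite author's own statement) =====
-- stated objective: simpler
-- what changed: Replaces the linear scan over 7 keywords (each tested with equality and a startswith) by extracting the first one or two words of the lowercased stripped message with str.partition on a single-space separator and looking them up in a one-word set and a word-pair set.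
import Mathlib
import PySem

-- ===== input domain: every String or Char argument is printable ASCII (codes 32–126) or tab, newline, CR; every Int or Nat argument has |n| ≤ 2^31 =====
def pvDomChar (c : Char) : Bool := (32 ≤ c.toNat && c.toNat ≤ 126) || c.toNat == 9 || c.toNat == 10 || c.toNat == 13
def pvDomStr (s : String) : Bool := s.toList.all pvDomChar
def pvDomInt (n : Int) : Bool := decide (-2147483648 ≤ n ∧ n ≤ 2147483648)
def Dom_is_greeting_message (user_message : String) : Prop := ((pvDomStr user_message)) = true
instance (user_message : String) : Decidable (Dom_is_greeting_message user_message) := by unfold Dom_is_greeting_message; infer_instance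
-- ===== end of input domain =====

-- B replaces A's linear scan over 7 keywords (each tested with == and startswith) by extracting
-- the first one or two words with str.partition on the single-space separator and looking them up in a word set and a
-- word-pair set (objective: simpler).

-- ===== PORT A =====
def pvGreetingKeywords : List (List Char) :=
  [['h', 'i'], ['h', 'e', 'l', 'l', 'o'], ['h', 'e', 'y'], ['t', 'h', 'a', 'n', 'k', 's'],
   ['t', 'h', 'a', 'n', 'k', ' ', 'y', 'o', 'u'], ['g', 'o', 'o', 'd', ' ', 'm', 'o', 'r', 'n', 'i', 'n', 'g'], ['g', 'o', 'o', 'd', ' ', 'e', 'v', 'e', 'n', 'i', 'n', 'g']]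

def is_greeting_message (user_message : String) : Bool :=
  let message_lower := PySem.Chars.strip (PySem.Chars.lower user_message.toList)
  pvGreetingKeywords.any (fun keyword =>
    decide (message_lower = keyword) || PySem.Chars.startswith message_lower (keyword ++ [' ']))

-- ===== PORT B =====
def pvOneWord : List (List Char) :=
  PySem.Set.ofList [['h', 'i'], ['h', 'e', 'l', 'l', 'o'], ['h', 'e', 'y'], ['t', 'h', 'a', 'n', 'k', 's']]

def pvPairs : List (List Char × List Char) :=
  PySem.Set.ofList
    [(['t', 'h', 'a', 'n', 'k'], ['y', 'o', 'u']),
     (['g', 'o', 'o', 'd'], ['m', 'o', 'r', 'n', 'i', 'n', 'g']),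
     (['g', 'o', 'o', 'd'], ['e', 'v', 'e', 'n', 'i', 'n', 'g'])]

-- hand port of str.partition with the single-space separator: scans to the first
-- space; returns (before, whether the separator was found, after) — exact for this separator
def pvPartitionSpace : List Char → List Char × Bool × List Char
  | [] => ([], false, [])
  | c :: r =>
      if c = ' ' then ([], true, r)
      else
        let (a, f, b) := pvPartitionSpace r
        (c :: a, f, b)

def is_greeting_message_alt (user_message : String) : Bool :=
  let s := PySem.Chars.strip (PySem.Chars.lower user_message.toList)
  let (first, sep, rest) := pvPartitionSpace s
  if first ∈ pvOneWord then true
  else sep && decide ((first, (pvPartitionSpace rest).1) ∈ pvPairs)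

-- ===== PRECONDITION & SPEC =====
def Spec_is_greeting_message (user_message : String) (out : Bool) : Prop := out = is_greeting_message_alt user_message
instance (user_message : String) (out : Bool) : Decidable (Spec_is_greeting_message user_message out) := by unfold Spec_is_greeting_message; infer_instance

-- ===== CLAIM (what is proved, stated in full; the proofs are below) =====
def Claim_equal_is_greeting_message : Prop := ∀ (user_message : String), Dom_is_greeting_message user_message → Spec_is_greeting_message user_message (is_greeting_message user_message)

-- ===== LEMMAS AND PROOFS =====

-- the word predicate: a character that is not the separator ' '
def pvP (c : Char) : Bool := !(c == ' ')

lemma pvPartition_eq (l : List Char) :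
    pvPartitionSpace l = (l.takeWhile pvP, !(l.dropWhile pvP).isEmpty, (l.dropWhile pvP).tail) := by
  induction l with
  | nil => simp [pvPartitionSpace]
  | cons c r ih =>
      by_cases hc : c = ' '
      · subst hc; simp [pvPartitionSpace, pvP]
      · have hp : pvP c = true := by simp [pvP, hc]
        simp [pvPartitionSpace, hc, ih, hp]

lemma pvHead_dropWhile {l r : List Char} {c : Char} (h : l.dropWhile pvP = c :: r) :
    c = ' ' := by
  induction l with
  | nil => simp at h
  | cons a l ih =>
      rw [List.dropWhile_cons] at h
      by_cases ha : pvP a = true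
      · rw [if_pos ha] at h
        exact ih h
      · rw [if_neg ha] at h
        cases h
        simpa [pvP] using ha

-- A's per-keyword test for a one-word keyword, characterised by the first word
lemma pvOne_char (w t : List Char) (hw : ∀ c ∈ w, pvP c) :
    (t = w ∨ (w ++ [' ']) <+: t) ↔ t.takeWhile pvP = w := by
  constructor
  · rintro (rfl | ⟨s, rfl⟩)
    · exact List.takeWhile_eq_self_iff.mpr hw
    · rw [List.append_assoc]
      simp [List.takeWhile_append, List.takeWhile_eq_self_iff.mpr hw, pvP]
  · intro h
    have hsplit := List.takeWhile_append_dropWhile (p := pvP) (l := t)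
    rw [h] at hsplit
    cases hd : t.dropWhile pvP with
    | nil => left; rw [← hsplit, hd]; simp
    | cons c r =>
        have hc : c = ' ' := pvHead_dropWhile hd
        subst hc
        right
        exact ⟨r, by rw [← hsplit, hd]; simp⟩

-- A's per-keyword test for a two-word keyword "w1 w2"
lemma pvTwo_char (w1 w2 t : List Char) (h1 : ∀ c ∈ w1, pvP c) :
    (t = w1 ++ ' ' :: w2 ∨ (w1 ++ ' ' :: w2 ++ [' ']) <+: t) ↔
    (t.takeWhile pvP = w1 ∧ ∃ r, t.dropWhile pvP = ' ' :: r ∧ (r = w2 ∨ (w2 ++ [' ']) <+: r)) := by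
  have htw : ∀ (s : List Char), (w1 ++ ' ' :: s).takeWhile pvP = w1 := by
    intro s
    simp [List.takeWhile_append, List.takeWhile_eq_self_iff.mpr h1, pvP]
  have hdw : ∀ (s : List Char), (w1 ++ ' ' :: s).dropWhile pvP = ' ' :: s := by
    intro s
    have hs := List.takeWhile_append_dropWhile (p := pvP) (l := w1 ++ ' ' :: s)
    rw [htw s] at hs
    exact List.append_cancel_left hs
  constructor
  · rintro (rfl | ⟨s, hs⟩)
    · exact ⟨htw w2, w2, hdw w2, Or.inl rfl⟩
    · have ht : t = w1 ++ ' ' :: (w2 ++ ' ' :: s) := by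
        rw [← hs]; simp
      subst ht
      exact ⟨htw _, w2 ++ ' ' :: s, hdw _, Or.inr ⟨s, by simp⟩⟩
  · rintro ⟨hw, r, hd, hr⟩
    have ht : t = w1 ++ ' ' :: r := by
      have hs := List.takeWhile_append_dropWhile (p := pvP) (l := t)
      rw [hw, hd] at hs
      exact hs.symm
    subst ht
    rcases hr with rfl | ⟨s, rfl⟩
    · exact Or.inl rfl
    · exact Or.inr ⟨s, by simp⟩

-- the whole equivalence, as a statement about an arbitrary character list
set_option maxRecDepth 8192 in
lemma pvMain (t : List Char) :
    (pvGreetingKeywords.any (fun keyword =>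
        decide (t = keyword) || PySem.Chars.startswith t (keyword ++ [' ']))) =
    (let (first, sep, rest) := pvPartitionSpace t
     if first ∈ pvOneWord then true
     else sep && decide ((first, (pvPartitionSpace rest).1) ∈ pvPairs)) := by
  have hhi : ∀ c ∈ ['h', 'i'], pvP c = true := by simp [pvP]
  have hhello : ∀ c ∈ ['h', 'e', 'l', 'l', 'o'], pvP c = true := by simp [pvP]
  have hhey : ∀ c ∈ ['h', 'e', 'y'], pvP c = true := by simp [pvP]
  have hthanks : ∀ c ∈ ['t', 'h', 'a', 'n', 'k', 's'], pvP c = true := by simp [pvP]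
  have hthank : ∀ c ∈ ['t', 'h', 'a', 'n', 'k'], pvP c = true := by simp [pvP]
  have hgood : ∀ c ∈ ['g', 'o', 'o', 'd'], pvP c = true := by simp [pvP]
  have hyou : ∀ c ∈ ['y', 'o', 'u'], pvP c = true := by simp [pvP]
  have hmorning : ∀ c ∈ ['m', 'o', 'r', 'n', 'i', 'n', 'g'], pvP c = true := by simp [pvP]
  have hevening : ∀ c ∈ ['e', 'v', 'e', 'n', 'i', 'n', 'g'], pvP c = true := by simp [pvP]
  rw [Bool.eq_iff_iff]
  simp only [pvGreetingKeywords, List.any_cons, List.any_nil, Bool.or_eq_true, Bool.or_false,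
    decide_eq_true_eq, PySem.Chars.startswith_iff]
  simp only [List.cons_append, List.nil_append]
  have c1 := pvOne_char ['h', 'i'] t hhi
  have c2 := pvOne_char ['h', 'e', 'l', 'l', 'o'] t hhello
  have c3 := pvOne_char ['h', 'e', 'y'] t hhey
  have c4 := pvOne_char ['t', 'h', 'a', 'n', 'k', 's'] t hthanks
  have c5 := pvTwo_char ['t', 'h', 'a', 'n', 'k'] ['y', 'o', 'u'] t hthank
  have c6 := pvTwo_char ['g', 'o', 'o', 'd'] ['m', 'o', 'r', 'n', 'i', 'n', 'g'] t hgood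
  have c7 := pvTwo_char ['g', 'o', 'o', 'd'] ['e', 'v', 'e', 'n', 'i', 'n', 'g'] t hgood
  simp only [List.cons_append, List.nil_append] at c1 c2 c3 c4 c5 c6 c7
  rw [c1, c2, c3, c4, c5, c6, c7]
  rw [pvPartition_eq t]
  cases hd : t.dropWhile pvP with
  | nil =>
      simp [pvOneWord, PySem.Set.mem_ofList]
  | cons c r =>
      have hc : c = ' ' := pvHead_dropWhile hd
      subst hc
      have d5 := pvOne_char ['y', 'o', 'u'] r hyou
      have d6 := pvOne_char ['m', 'o', 'r', 'n', 'i', 'n', 'g'] r hmorning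
      have d7 := pvOne_char ['e', 'v', 'e', 'n', 'i', 'n', 'g'] r hevening
      simp only [List.cons_append, List.nil_append] at d5 d6 d7
      simp only [List.isEmpty_cons, Bool.not_false, List.tail_cons]
      simp only [pvPartition_eq r]
      simp [pvOneWord, pvPairs, PySem.Set.mem_ofList, Prod.mk.injEq]
      rw [← d5, ← d6, ← d7]
      simp only [or_assoc]

-- ===== VERDICT (by name: the statement is the Claim_ definition above) =====
theorem is_greeting_message_spec : Claim_equal_is_greeting_message := by
  intro m _
  unfold Spec_is_greeting_message is_greeting_message is_greeting_message_alt
  exact pvMain (PySem.Chars.strip (PySem.Chars.lower m.toList))
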